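-- pv_equiv track=rewrite | github.com/codemario318/Algorithm | python3/boj/8958_OX퀴즈.py | ox
-- ===== SOURCE A (Python) =====
-- def ox(s):
--     res = 0
--     cnt = 1
--     for ans in s:
--         if ans =="O":
--             res += cnt
--             cnt += 1
--         else:
--             cnt = 1
--     return res
-- ===== SOURCE B (Python) =====
-- def ox(s):
--     total = 0
--     it = iter(s)
--     c = next(it, None)
--     while c is not None:
--         k = 1
--         nxt = next(it, None)
--         while nxt == c:
--             k += 1
--             nxt = next(it, None)
--         if c == "O":
--             total += k * (k + 1) // 2
--         c = nxt
--     return total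
-- ===== Notes on version B (the rewrite author's own statement) =====
-- stated objective: alternative
-- what changed: B processes the string run by run (maximal blocks of equal consecutive characters) and adds the closed-form triangular number k*(k+1)//2 for each O-run, instead of A's per-character counter that increments and resets.
import Mathlib
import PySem

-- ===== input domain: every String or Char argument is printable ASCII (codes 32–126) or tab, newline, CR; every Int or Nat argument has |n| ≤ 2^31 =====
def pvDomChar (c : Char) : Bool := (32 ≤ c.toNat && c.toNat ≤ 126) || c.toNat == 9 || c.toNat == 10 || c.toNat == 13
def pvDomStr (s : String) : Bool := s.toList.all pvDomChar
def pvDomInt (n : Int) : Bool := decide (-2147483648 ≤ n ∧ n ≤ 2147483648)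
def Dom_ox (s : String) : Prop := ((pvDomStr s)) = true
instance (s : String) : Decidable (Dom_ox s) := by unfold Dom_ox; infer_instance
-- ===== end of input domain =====

-- B replaces A's per-character running counter by a run-by-run scan with a closed-form
-- triangular number per O-run (objective: alternative decomposition, same cost).

-- ===== PORT A =====
-- 'for ans in s' with state (res, cnt)
def oxLoop : List Char → Int → Int → Int
  | [], res, _ => res
  | c :: t, res, cnt => if c == 'O' then oxLoop t (res + cnt) (cnt + 1) else oxLoop t res 1

def ox (s : String) : Int := oxLoop s.toList 0 1

-- ===== PORT B =====
-- outer loop: one iteration per maximal run; the inner counting loop's k is the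
-- run length (= takeWhile length) and the loop resumes after the run (= dropWhile).
def oxRuns : List Char → Int
  | [] => 0
  | c :: t =>
    (if c == 'O' then ((((c :: t).takeWhile (· == c)).length * (((c :: t).takeWhile (· == c)).length + 1) / 2 : Nat) : Int) else 0)
      + oxRuns ((c :: t).dropWhile (· == c))
  termination_by l => l.length
  decreasing_by
    simp only [List.dropWhile, beq_self_eq_true]
    have h := List.length_dropWhile_le (fun x => x == c) t
    simp only [List.length_cons]
    omega

def ox_alt (s : String) : Int := oxRuns s.toList

-- ===== PRECONDITION & SPEC =====
def Spec_ox (s : String) (out : Int) : Prop := out = ox_alt s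
instance (s : String) (out : Int) : Decidable (Spec_ox s out) := by unfold Spec_ox; infer_instance

-- ===== CLAIM (what is proved, stated in full; the proofs are below) =====
def Claim_equal_ox : Prop := ∀ (s : String), Dom_ox s → Spec_ox s (ox s)

-- ===== LEMMAS AND PROOFS =====

theorem tri_step (m : Nat) : m * (m + 1) / 2 = m + m * (m - 1) / 2 := by
  cases m with
  | zero => simp
  | succ k =>
    have h : (k + 1) * (k + 1 + 1) = (k + 1) * (k + 1 - 1) + (k + 1) * 2 := by
      simp only [Nat.add_sub_cancel]; ring
    rw [h, Nat.add_mul_div_right _ _ (by norm_num)]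
    omega

theorem oxLoop_replicate (m : Nat) (rest : List Char) (res cnt : Int) :
    oxLoop (List.replicate m 'O' ++ rest) res cnt
      = oxLoop rest (res + m * cnt + (m * (m - 1) / 2 : Nat)) (cnt + m) := by
  induction m generalizing res cnt with
  | zero => simp
  | succ n ih =>
    simp only [List.replicate_succ, List.cons_append, oxLoop, beq_self_eq_true, if_pos]
    rw [ih]
    have h : (n + 1) * ((n + 1) - 1) / 2 = n + n * (n - 1) / 2 := by
      rw [Nat.add_sub_cancel, Nat.mul_comm]
      exact tri_step n
    congr 1
    · rw [h]; push_cast; ring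
    · push_cast; ring

theorem oxRuns_cons_ne (d : Char) (t : List Char) (hd : ¬ (d == 'O') = true) :
    oxRuns (d :: t) = oxRuns t := by
  rw [show oxRuns (d :: t)
        = (if d == 'O' then ((((d :: t).takeWhile (· == d)).length * (((d :: t).takeWhile (· == d)).length + 1) / 2 : Nat) : Int) else 0)
          + oxRuns ((d :: t).dropWhile (· == d)) from by simp only [oxRuns]]
  rw [if_neg hd, zero_add]
  cases t with
  | nil => simp [List.dropWhile]
  | cons x t' =>
    by_cases hx : (x == d) = true
    · have hx' : x = d := by simpa using hx
      subst hx'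
      simp only [List.dropWhile, beq_self_eq_true]
      rw [show oxRuns (x :: t')
            = (if x == 'O' then ((((x :: t').takeWhile (· == x)).length * (((x :: t').takeWhile (· == x)).length + 1) / 2 : Nat) : Int) else 0)
              + oxRuns ((x :: t').dropWhile (· == x)) from by simp only [oxRuns]]
      have hxO : ¬ (x == 'O') = true := hd
      rw [if_neg hxO, zero_add]
      simp [List.dropWhile]
    · simp [List.dropWhile, hx]

theorem dropWhile_head_false {α : Type} (p : α → Bool) (l : List α) (d : α) (r' : List α)
    (h : List.dropWhile p l = d :: r') : p d = false := by
  induction l with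
  | nil => simp [List.dropWhile] at h
  | cons x xs ih =>
    cases hp : p x with
    | true => exact ih (by simpa [List.dropWhile, hp] using h)
    | false =>
      have hcons : x :: xs = d :: r' := by simpa [List.dropWhile, hp] using h
      injection hcons with h1 h2
      rw [← h1]
      exact hp

theorem oxLoop_eq_oxRuns_aux : ∀ n : Nat, ∀ l : List Char, l.length ≤ n →
    ∀ res : Int, oxLoop l res 1 = res + oxRuns l := by
  intro n
  induction n with
  | zero =>
    intro l hl res
    have : l = [] := List.eq_nil_of_length_eq_zero (Nat.le_zero.mp hl)
    subst this; simp [oxLoop, oxRuns]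
  | succ n ih =>
    intro l hl res
    cases l with
    | nil => simp [oxLoop, oxRuns]
    | cons c t =>
      by_cases hc : (c == 'O') = true
      · have hc' : c = 'O' := by simpa using hc
        subst hc'
        set u := List.takeWhile (· == 'O') ('O' :: t) with hu
        set r := List.dropWhile (· == 'O') ('O' :: t) with hr
        have hsplit : u ++ r = 'O' :: t := List.takeWhile_append_dropWhile
        have hrep : u = List.replicate u.length 'O' := by
          apply List.eq_replicate_of_mem
          intro b hb
          have := List.mem_takeWhile_imp (hu ▸ hb)
          simpa using this
        have hrlen : r.length ≤ t.length := by
          have : r = List.dropWhile (· == 'O') t := by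
            rw [hr]; simp [List.dropWhile]
          rw [this]; exact List.length_dropWhile_le _ _
        have hloop : oxLoop ('O' :: t) res 1
            = oxLoop r (res + (u.length : Int) * 1 + ((u.length * (u.length - 1) / 2 : Nat) : Int)) (1 + u.length) := by
          conv_lhs => rw [← hsplit, hrep]
          exact oxLoop_replicate u.length r res 1
        have htri : (res + (u.length : Int) * 1 + ((u.length * (u.length - 1) / 2 : Nat) : Int))
            = res + ((u.length * (u.length + 1) / 2 : Nat) : Int) := by
          rw [tri_step u.length]; push_cast; ring
        have hruns : oxRuns ('O' :: t)
            = ((u.length * (u.length + 1) / 2 : Nat) : Int) + oxRuns r := by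
          rw [show oxRuns ('O' :: t)
                = (if 'O' == 'O' then (((('O' :: t).takeWhile (· == 'O')).length * ((('O' :: t).takeWhile (· == 'O')).length + 1) / 2 : Nat) : Int) else 0)
                  + oxRuns (('O' :: t).dropWhile (· == 'O')) from by simp only [oxRuns]]
          rw [if_pos (by simp)]
        rw [hloop, htri, hruns]
        cases hrc : r with
        | nil => simp [oxLoop, oxRuns]
        | cons d r' =>
          have hd : (d == 'O') = false := dropWhile_head_false (· == 'O') ('O' :: t) d r' (hr.symm.trans hrc)
          have hstep : oxLoop (d :: r') (res + ((u.length * (u.length + 1) / 2 : Nat) : Int)) (1 + u.length)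
              = oxLoop r' (res + ((u.length * (u.length + 1) / 2 : Nat) : Int)) 1 := by
            simp only [oxLoop, hd]
            simp
          have hr'len : r'.length ≤ n := by
            have := hrc ▸ hrlen
            simp only [List.length_cons] at this hl
            omega
          rw [hstep, ih r' hr'len]
          have : oxRuns (d :: r') = oxRuns r' := oxRuns_cons_ne d r' (by simp [hd])
          rw [this]; ring
      · rw [show oxLoop (c :: t) res 1 = oxLoop t res 1 from by
          simp only [oxLoop]; rw [if_neg hc]]
        have ht : t.length ≤ n := by simp only [List.length_cons] at hl; omega
        rw [ih t ht res, oxRuns_cons_ne c t hc]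

theorem oxLoop_eq_oxRuns (l : List Char) (res : Int) : oxLoop l res 1 = res + oxRuns l :=
  oxLoop_eq_oxRuns_aux l.length l (le_refl _) res

-- ===== VERDICT (by name: the statement is the Claim_ definition above) =====
theorem ox_spec : Claim_equal_ox := by
  intro s _
  unfold Spec_ox ox ox_alt
  have := oxLoop_eq_oxRuns s.toList 0
  simpa using this
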